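-- pv_equiv track=rewrite | github.com/allpedroza/data-governance-ai-agents-kit | data_governance/data_steward/quality_rules/rule_drafter.py | suggest_dimensions
-- ===== SOURCE A (Python) =====
-- from typing import Any, Dict, List, Optional
--
-- def suggest_dimensions(
--     dataset: str, columns: List[Dict[str, Any]]
-- ) -> List[str]:
--     """Suggest relevant quality dimensions for a dataset."""
--     dims = {"completeness", "validity"}
--     for col in columns:
--         name = col.get("name", "").lower()
--         if any(p in name for p in ("_id", "id_", "cpf", "cnpj", "email")):
--             dims.add("uniqueness")
--         if any(p in name for p in ("date", "data", "timestamp", "updated")):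
--             dims.add("timeliness")
--         if any(p in name for p in ("fk_", "ref_", "_ref")):
--             dims.add("referential_integrity")
--     return sorted(dims)
-- ===== SOURCE B (Python) =====
-- _RULES = (
--     ("completeness", None),
--     ("referential_integrity", ("fk_", "ref_", "_ref")),
--     ("timeliness", ("date", "data", "timestamp", "updated")),
--     ("uniqueness", ("_id", "id_", "cpf", "cnpj", "email")),
--     ("validity", None),
-- )
--
-- def suggest_dimensions(dataset, columns):
--     """Suggest relevant quality dimensions for a dataset."""
--     # Join all lowercased names into one ','-separated blob: no pattern contains
--     # ',', so a pattern occurs in the blob iff it occurs in some single name.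
--     blob = ",".join(col.get("name", "").lower() for col in columns)
--     return [dim for dim, pats in _RULES
--             if pats is None or any(p in blob for p in pats)]
-- ===== Notes on version B (the rewrite author's own statement) =====
-- stated objective: alternative
-- what changed: Instead of maintaining a seeded set per column and sorting it at the end, B concatenates all lowercased names into one comma-separated blob (no pattern contains ','), tests each pattern once against that single string, and emits the result by filtering a pre-sorted candidate table, so there is no set and no sort.
import Mathlib
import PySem

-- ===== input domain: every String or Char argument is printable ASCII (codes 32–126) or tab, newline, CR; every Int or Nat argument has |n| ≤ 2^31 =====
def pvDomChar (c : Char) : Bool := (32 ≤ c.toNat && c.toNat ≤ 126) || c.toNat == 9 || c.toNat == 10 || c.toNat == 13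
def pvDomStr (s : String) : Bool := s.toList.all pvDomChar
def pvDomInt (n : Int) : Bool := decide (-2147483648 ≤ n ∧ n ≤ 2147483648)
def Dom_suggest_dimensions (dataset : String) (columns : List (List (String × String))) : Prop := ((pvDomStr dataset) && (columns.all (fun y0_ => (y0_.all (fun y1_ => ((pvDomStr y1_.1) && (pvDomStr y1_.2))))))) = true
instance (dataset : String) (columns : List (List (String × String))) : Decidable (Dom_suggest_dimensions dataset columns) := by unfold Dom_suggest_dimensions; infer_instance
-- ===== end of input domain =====

-- B drops A's seeded set and final sort: it joins all lowercased names into one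
-- comma-separated blob, tests each pattern against that single string, and emits the
-- result by filtering a pre-sorted candidate table (alternative decomposition, no speed claim).

-- ===== PORT A =====
def suggest_dimensions (dataset : String) (columns : List (List (String × String))) : List String :=
  let dims : PySem.Set String := PySem.Set.ofList ["completeness", "validity"]
  let dims := columns.foldl (fun dims col =>
    let name := PySem.Str.lower (PySem.Dict.getD (PySem.Dict.mk col) "name" "")
    let dims := if (["_id", "id_", "cpf", "cnpj", "email"] : List String).any
        (fun p => PySem.Str.isIn p name) then PySem.Set.add dims "uniqueness" else dims
    let dims := if (["date", "data", "timestamp", "updated"] : List String).any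
        (fun p => PySem.Str.isIn p name) then PySem.Set.add dims "timeliness" else dims
    if (["fk_", "ref_", "_ref"] : List String).any
        (fun p => PySem.Str.isIn p name) then PySem.Set.add dims "referential_integrity" else dims) dims
  PySem.List.sorted dims (fun x => x) false

-- ===== PORT B =====
-- the module-level _RULES table of Source B (pre-sorted candidates; none = always included)
def sdRULES : List (String × Option (List String)) :=
  [("completeness", none),
   ("referential_integrity", some ["fk_", "ref_", "_ref"]),
   ("timeliness", some ["date", "data", "timestamp", "updated"]),
   ("uniqueness", some ["_id", "id_", "cpf", "cnpj", "email"]),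
   ("validity", none)]

def suggest_dimensions_alt (dataset : String) (columns : List (List (String × String))) : List String :=
  let blob := PySem.Str.join ","
    (columns.map (fun col => PySem.Str.lower (PySem.Dict.getD (PySem.Dict.mk col) "name" "")))
  (sdRULES.filter (fun r =>
    match r.2 with
    | none => true
    | some pats => pats.any (fun p => PySem.Str.isIn p blob))).map Prod.fst

-- ===== PRECONDITION & SPEC =====
def Spec_suggest_dimensions (dataset : String) (columns : List (List (String × String))) (out : List String) : Prop := out = suggest_dimensions_alt dataset columns
instance (dataset : String) (columns : List (List (String × String))) (out : List String) : Decidable (Spec_suggest_dimensions dataset columns out) := by unfold Spec_suggest_dimensions; infer_instance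

-- ===== CLAIM (what is proved, stated in full; the proofs are below) =====
def Claim_equal_suggest_dimensions : Prop := ∀ (dataset : String) (columns : List (List (String × String))), Dom_suggest_dimensions dataset columns → Spec_suggest_dimensions dataset columns (suggest_dimensions dataset columns)

-- ===== LEMMAS AND PROOFS =====

-- shared shapes: lowercased name of a column, pattern hit, A's per-column step
def sdName (col : List (String × String)) : String :=
  PySem.Str.lower (PySem.Dict.getD (PySem.Dict.mk col) "name" "")

def sdHit (pats : List String) (col : List (String × String)) : Bool :=
  pats.any (fun p => PySem.Str.isIn p (sdName col))

def sdP1 : List String := ["_id", "id_", "cpf", "cnpj", "email"]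
def sdP2 : List String := ["date", "data", "timestamp", "updated"]
def sdP3 : List String := ["fk_", "ref_", "_ref"]

def sdBase : PySem.Set String := PySem.Set.ofList ["completeness", "validity"]

def sdStep (dims : PySem.Set String) (col : List (String × String)) : PySem.Set String :=
  let dims := if sdHit sdP1 col then PySem.Set.add dims "uniqueness" else dims
  let dims := if sdHit sdP2 col then PySem.Set.add dims "timeliness" else dims
  if sdHit sdP3 col then PySem.Set.add dims "referential_integrity" else dims

-- B's output shape for given hit booleans (uniq, time, ref)
def sdBList (b1 b2 b3 : Bool) : List String :=
  "completeness" :: ((if b3 then ["referential_integrity"] else []) ++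
    ((if b2 then ["timeliness"] else []) ++
      ((if b1 then ["uniqueness"] else []) ++ ["validity"])))

lemma sdA_eq (dataset : String) (cols : List (List (String × String))) :
    suggest_dimensions dataset cols
      = PySem.List.sorted (cols.foldl sdStep sdBase) (fun x => x) false := rfl

-- ---- A-side set characterisation ----

lemma sdStep_nodup {s : PySem.Set String} (h : s.Nodup) (col : List (String × String)) :
    (sdStep s col).Nodup := by
  unfold sdStep
  generalize sdHit sdP1 col = b1
  generalize sdHit sdP2 col = b2
  generalize sdHit sdP3 col = b3
  cases b1 <;> cases b2 <;> cases b3 <;> simp only [Bool.false_eq_true, if_false, if_true] <;>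
    (repeat' apply PySem.Set.nodup_add) <;> exact h

lemma sdFold_nodup (cols : List (List (String × String))) (s : PySem.Set String) (h : s.Nodup) :
    (cols.foldl sdStep s).Nodup := by
  induction cols generalizing s with
  | nil => exact h
  | cons c t ih => exact ih _ (sdStep_nodup h c)

lemma sdStep_mem (x : String) (s : PySem.Set String) (col : List (String × String)) :
    x ∈ sdStep s col ↔ x ∈ s ∨ (x = "uniqueness" ∧ sdHit sdP1 col = true)
      ∨ (x = "timeliness" ∧ sdHit sdP2 col = true)
      ∨ (x = "referential_integrity" ∧ sdHit sdP3 col = true) := by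
  unfold sdStep
  generalize sdHit sdP1 col = b1
  generalize sdHit sdP2 col = b2
  generalize sdHit sdP3 col = b3
  cases b1 <;> cases b2 <;> cases b3 <;> simp [PySem.Set.mem_add] <;> tauto

lemma sdFold_mem (x : String) (cols : List (List (String × String))) (s : PySem.Set String) :
    x ∈ cols.foldl sdStep s ↔ x ∈ s ∨ (x = "uniqueness" ∧ cols.any (sdHit sdP1) = true)
      ∨ (x = "timeliness" ∧ cols.any (sdHit sdP2) = true)
      ∨ (x = "referential_integrity" ∧ cols.any (sdHit sdP3) = true) := by
  induction cols generalizing s with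
  | nil => simp
  | cons c t ih =>
    simp only [List.foldl_cons, ih, sdStep_mem, List.any_cons, Bool.or_eq_true]
    generalize sdHit sdP1 c = b1
    generalize sdHit sdP2 c = b2
    generalize sdHit sdP3 c = b3
    generalize t.any (sdHit sdP1) = c1
    generalize t.any (sdHit sdP2) = c2
    generalize t.any (sdHit sdP3) = c3
    cases b1 <;> cases b2 <;> cases b3 <;> cases c1 <;> cases c2 <;> cases c3 <;> simp <;> tauto

-- ---- substring-in-join characterisation (the blob trick) ----

-- a pattern not containing c cannot straddle the c in u ++ c :: v: prefix case
lemma sdPrefix_split (p u v : List Char) (c : Char) (hc : c ∉ p)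
    (h : p <+: u ++ c :: v) : p <+: u := by
  rcases h with ⟨t, ht⟩
  by_cases hlen : p.length ≤ u.length
  · have h1 : (p ++ t).take p.length = p := List.take_left
    have h2 : (u ++ c :: v).take p.length = u.take p.length :=
      List.take_append_of_le_length hlen
    rw [ht, h2] at h1
    rw [← h1]
    exact List.take_prefix _ _
  · exfalso
    push_neg at hlen
    have h1 : (p ++ t)[u.length]? = some (p[u.length]'hlen) := by
      rw [List.getElem?_append_left hlen]
      exact List.getElem?_eq_getElem hlen
    have h2 : (u ++ c :: v)[u.length]? = some c := by
      rw [List.getElem?_append_right (le_refl _)]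
      simp
    rw [ht, h2] at h1
    exact hc ((Option.some.inj h1).symm ▸ List.getElem_mem hlen)

-- an occurrence of p (with c ∉ p) in u ++ c :: v lies wholly in u or wholly in v
lemma sdInfix_split (p : List Char) (hp : p ≠ []) (c : Char) (hc : c ∉ p) :
    ∀ u v : List Char, (p <:+: u ++ c :: v ↔ p <:+: u ∨ p <:+: v) := by
  intro u
  induction u with
  | nil =>
    intro v
    constructor
    · intro h
      rcases List.infix_cons_iff.mp h with h | h
      · exact absurd (List.prefix_nil.mp (sdPrefix_split p [] v c hc h)) hp
      · exact Or.inr h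
    · rintro (h | h)
      · exact absurd (List.infix_nil.mp h) hp
      · exact h.trans ⟨[c], [], by simp⟩
  | cons a u' ih =>
    intro v
    constructor
    · intro h
      rcases List.infix_cons_iff.mp h with h | h
      · exact Or.inl (sdPrefix_split p (a :: u') v c hc h).isInfix
      · rcases (ih v).mp h with h | h
        · exact Or.inl (h.trans ⟨[a], [], by simp⟩)
        · exact Or.inr h
    · rintro (h | h)
      · exact h.trans ⟨[], c :: v, by simp⟩
      · exact h.trans ⟨a :: u' ++ [c], [], by simp⟩

lemma sdInfix_join (p : List Char) (hp : p ≠ []) (hc : ',' ∉ p) :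
    ∀ ns : List (List Char), (p <:+: PySem.Chars.join [','] ns ↔ ∃ n ∈ ns, p <:+: n) := by
  intro ns
  induction ns with
  | nil => simp [PySem.Chars.join_nil, List.infix_nil, hp]
  | cons n rest ih =>
    cases rest with
    | nil => simp [PySem.Chars.join_singleton]
    | cons m rest' =>
      rw [PySem.Chars.join_cons_cons]
      have : n ++ [','] ++ PySem.Chars.join [','] (m :: rest')
          = n ++ ',' :: PySem.Chars.join [','] (m :: rest') := by simp
      rw [this, sdInfix_split p hp ',' hc, ih]
      simp

-- a pattern group hits the blob iff it hits some individual name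
lemma sdAny_isIn_join (pats : List String)
    (h : ∀ p ∈ pats, p.toList ≠ [] ∧ (',' ∉ p.toList)) (names : List String) :
    pats.any (fun p => PySem.Str.isIn p (PySem.Str.join "," names))
      = names.any (fun n => pats.any (fun p => PySem.Str.isIn p n)) := by
  rcases Bool.eq_false_or_eq_true (names.any (fun n => pats.any (fun p => PySem.Str.isIn p n)))
    with hr | hr <;> rw [hr]
  · rcases List.any_eq_true.mp hr with ⟨n, hn, hin⟩
    rcases List.any_eq_true.mp hin with ⟨p, hpmem, hpin⟩
    apply List.any_eq_true.mpr
    refine ⟨p, hpmem, ?_⟩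
    rw [PySem.Str.isIn_iff_infix, PySem.Str.toList_join]
    have : (",".toList : List Char) = [','] := rfl
    rw [this, sdInfix_join p.toList (h p hpmem).1 (h p hpmem).2]
    exact ⟨n.toList, List.mem_map_of_mem hn, (PySem.Str.isIn_iff_infix p n).mp hpin⟩
  · rw [Bool.eq_false_iff]
    intro hl
    rcases List.any_eq_true.mp hl with ⟨p, hpmem, hpin⟩
    have hinf := (PySem.Str.isIn_iff_infix p _).mp hpin
    rw [PySem.Str.toList_join] at hinf
    have : (",".toList : List Char) = [','] := rfl
    rw [this, sdInfix_join p.toList (h p hpmem).1 (h p hpmem).2] at hinf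
    rcases hinf with ⟨nl, hnl, hinf⟩
    rcases List.mem_map.mp hnl with ⟨n, hn, rfl⟩
    have : names.any (fun n => pats.any (fun p => PySem.Str.isIn p n)) = true :=
      List.any_eq_true.mpr ⟨n, hn, List.any_eq_true.mpr
        ⟨p, hpmem, (PySem.Str.isIn_iff_infix p n).mpr hinf⟩⟩
    rw [hr] at this; exact Bool.false_ne_true this

-- ---- B reduced to the three hit booleans ----

lemma sdB_eq (dataset : String) (cols : List (List (String × String))) :
    suggest_dimensions_alt dataset cols
      = sdBList (cols.any (sdHit sdP1)) (cols.any (sdHit sdP2)) (cols.any (sdHit sdP3)) := by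
  have key : ∀ pats : List String, (∀ p ∈ pats, p.toList ≠ [] ∧ (',' ∉ p.toList)) →
      pats.any (fun p => PySem.Str.isIn p
        (PySem.Str.join "," (cols.map (fun col =>
          PySem.Str.lower (PySem.Dict.getD (PySem.Dict.mk col) "name" "")))))
        = cols.any (sdHit pats) := by
    intro pats hp
    rw [sdAny_isIn_join pats hp, List.any_map]
    rfl
  simp only [suggest_dimensions_alt, sdRULES, List.filter_cons, List.filter_nil]
  rw [key ["fk_", "ref_", "_ref"] (by decide),
      key ["date", "data", "timestamp", "updated"] (by decide),
      key ["_id", "id_", "cpf", "cnpj", "email"] (by decide)]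
  simp only [sdBList, sdP1, sdP2, sdP3]
  rcases Bool.eq_false_or_eq_true (cols.any (sdHit ["_id", "id_", "cpf", "cnpj", "email"])) with h1 | h1 <;>
    rcases Bool.eq_false_or_eq_true (cols.any (sdHit ["date", "data", "timestamp", "updated"])) with h2 | h2 <;>
      rcases Bool.eq_false_or_eq_true (cols.any (sdHit ["fk_", "ref_", "_ref"])) with h3 | h3 <;>
        simp [h1, h2, h3]

-- ---- sorted set = filtered candidate list ----

lemma sdSorted_eq (b1 b2 b3 : Bool) (s : PySem.Set String) (hnd : s.Nodup)
    (hmem : ∀ x, x ∈ s ↔ (x = "completeness" ∨ x = "validity")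
      ∨ (x = "uniqueness" ∧ b1 = true) ∨ (x = "timeliness" ∧ b2 = true)
      ∨ (x = "referential_integrity" ∧ b3 = true)) :
    PySem.List.sorted s (fun x => x) false = sdBList b1 b2 b3 := by
  have hpw : List.Pairwise (fun a b : String => a < b) (sdBList b1 b2 b3) := by
    cases b1 <;> cases b2 <;> cases b3 <;> simp [sdBList] <;> decide
  apply PySem.List.sorted_eq_of_perm_of_pairwise_lt _ _ _ _ hpw
  apply (List.perm_ext_iff_of_nodup (hpw.imp ne_of_lt) hnd).mpr
  intro x
  rw [hmem]
  cases b1 <;> cases b2 <;> cases b3 <;> simp [sdBList] <;> tauto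

-- ===== VERDICT (by name: the statement is the Claim_ definition above) =====
theorem suggest_dimensions_spec : Claim_equal_suggest_dimensions := by
  intro dataset columns _
  show suggest_dimensions dataset columns = suggest_dimensions_alt dataset columns
  rw [sdA_eq, sdB_eq]
  apply sdSorted_eq _ _ _ _ (sdFold_nodup _ _ (PySem.Set.nodup_ofList _))
  intro x
  rw [sdFold_mem]
  constructor
  · rintro (h | h | h | h)
    · exact Or.inl (by simpa [sdBase, PySem.Set.mem_ofList] using h)
    · exact Or.inr (Or.inl h)
    · exact Or.inr (Or.inr (Or.inl h))
    · exact Or.inr (Or.inr (Or.inr h))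
  · rintro (h | h | h | h)
    · exact Or.inl (by simpa [sdBase, PySem.Set.mem_ofList] using h)
    · exact Or.inr (Or.inl h)
    · exact Or.inr (Or.inr (Or.inl h))
    · exact Or.inr (Or.inr (Or.inr h))
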